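-- pv_equiv track=rewrite | github.com/yotam-gafni/radiusDiameter | greedyBalancedSetSnapshot_d=16_example.py | complete_vectors
-- ===== SOURCE A (Python) =====
-- from copy import copy,deepcopy
--
-- d = 16
--
-- def complete_vectors(vecs, diffs):
-- 	added_length = 0
-- 	new_vecs = deepcopy(vecs)
-- 	for i in range(len(vecs)):
-- 		added_length += d - diffs[i]
-- 		for j in range(len(vecs)):
-- 			if j != i:
-- 				new_vecs[j] += "0" * (d - diffs[i])
-- 			else:
-- 				new_vecs[i] += "1" * (d - diffs[i])
-- 	return new_vecs, added_length
-- ===== SOURCE B (Python) =====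
-- d = 16
--
-- def complete_vectors(vecs, diffs):
--     # Prefix-sum block placement: vector j's whole suffix is exactly
--     # "0"*(pad before block j) + "1"*(block j) + "0"*(pad after block j),
--     # because all other blocks are zeros and coalesce. Built in one pass.
--     n = len(vecs)
--     ks = [d - diffs[i] for i in range(n)]
--     lens = [k if k > 0 else 0 for k in ks]   # "x"*k is empty for k <= 0
--     total_pad = sum(lens)
--     out = []
--     pre = 0
--     for v, L in zip(vecs, lens):
--         out.append(v + "0" * pre + "1" * L + "0" * (total_pad - pre - L))
--         pre += L
--     return out, sum(ks)
-- ===== Notes on version B (the rewrite author's own statement) =====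
-- stated objective: alternative
-- what changed: replaces A's nested (i,j) loops that append one block per pair with a prefix-sum placement: the block lengths are summed once and each vector's whole suffix is emitted as exactly three runs (leading zeros, its own ones-block, trailing zeros), one pass and one concatenation per vector
import Mathlib
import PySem

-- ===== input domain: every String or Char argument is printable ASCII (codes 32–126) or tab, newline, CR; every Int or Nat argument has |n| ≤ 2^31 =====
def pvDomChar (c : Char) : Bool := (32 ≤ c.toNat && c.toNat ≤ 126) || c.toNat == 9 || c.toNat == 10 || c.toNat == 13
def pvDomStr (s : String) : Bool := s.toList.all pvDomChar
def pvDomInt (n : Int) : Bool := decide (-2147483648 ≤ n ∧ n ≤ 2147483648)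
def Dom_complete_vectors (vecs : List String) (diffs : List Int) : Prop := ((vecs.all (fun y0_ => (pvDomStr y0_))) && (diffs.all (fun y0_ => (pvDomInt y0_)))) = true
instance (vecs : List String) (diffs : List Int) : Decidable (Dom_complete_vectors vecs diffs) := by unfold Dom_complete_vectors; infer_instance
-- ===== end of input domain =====

-- B replaces A's nested loops (one append per (i,j) pair) by prefix sums of the block lengths:
-- every vector's suffix is exactly '0'-run, '1'-run, '0'-run, built once per vector.
-- Equivalence is proved on inputs where len(diffs) >= len(vecs) (otherwise both Pythons raise IndexError).

-- shared string helpers (kernel-transparent ports of Python's  c * k  and  a + b  on str)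
def pvStrMul (c : Char) (k : Int) : String := String.ofList (List.replicate k.toNat c)
def pvStrAdd (a b : String) : String := String.ofList (a.toList ++ b.toList)

-- ===== PORT A =====
def complete_vectors (vecs : List String) (diffs : List Int) : List String × Int :=
  -- for i in range(len(vecs)): added_length += d - diffs[i]; for j …: new_vecs[j] += …
  (List.range vecs.length).foldl (fun (st : List String × Int) i =>
    let k : Int := 16 - diffs.getD i 0   -- diffs[i]; in range whenever Pre_ holds
    ((List.range vecs.length).foldl (fun nv j =>
        if j ≠ i then nv.set j (pvStrAdd (nv.getD j "") (pvStrMul '0' k))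
        else nv.set i (pvStrAdd (nv.getD i "") (pvStrMul '1' k))) st.1,
     st.2 + k)) (vecs, 0)

-- ===== PORT B =====
def complete_vectors_alt (vecs : List String) (diffs : List Int) : List String × Int :=
  let ks : List Int := (List.range vecs.length).map (fun i => 16 - diffs.getD i 0)
  let lens : List Nat := ks.map (fun k => if 0 < k then k.toNat else 0)
  let total : Nat := lens.sum
  let out := (vecs.zip lens).foldl (fun (st : List String × Nat) p =>
      (st.1 ++ [pvStrAdd p.1 (String.ofList
          (List.replicate st.2 '0' ++ List.replicate p.2 '1'
            ++ List.replicate (total - st.2 - p.2) '0'))],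
       st.2 + p.2)) ([], 0)
  (out.1, ks.sum)

-- ===== PRECONDITION & SPEC =====
-- A evaluates diffs[i] for every i < len(vecs): it raises IndexError iff len(diffs) < len(vecs);
-- exactly those inputs are excluded.
def Pre_complete_vectors (vecs : List String) (diffs : List Int) : Prop :=
  vecs.length ≤ diffs.length
instance (vecs : List String) (diffs : List Int) : Decidable (Pre_complete_vectors vecs diffs) := by
  unfold Pre_complete_vectors; infer_instance

def pvWitness_complete_vectors : List String × List Int := (["ab", "c"], [3, 16, 2])

def Spec_complete_vectors (vecs : List String) (diffs : List Int) (out : List String × Int) : Prop := out = complete_vectors_alt vecs diffs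
instance (vecs : List String) (diffs : List Int) (out : List String × Int) : Decidable (Spec_complete_vectors vecs diffs out) := by unfold Spec_complete_vectors; infer_instance

-- ===== CLAIM (what is proved, stated in full; the proofs are below) =====
def Claim_equal_complete_vectors : Prop := ∀ (vecs : List String) (diffs : List Int), Dom_complete_vectors vecs diffs → Pre_complete_vectors vecs diffs → Spec_complete_vectors vecs diffs (complete_vectors vecs diffs)

-- ===== LEMMAS AND PROOFS =====

theorem pvStrAdd_empty (a : String) : pvStrAdd a "" = a := by
  simp [pvStrAdd]

theorem pvStrAdd_assoc (a b c : String) : pvStrAdd (pvStrAdd a b) c = pvStrAdd a (pvStrAdd b c) := by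
  simp [pvStrAdd]

-- "".join(parts)
def pvJoin (parts : List String) : String := String.ofList ((parts.map String.toList).flatten)

theorem pvJoin_append_singleton (xs : List String) (x : String) :
    pvJoin (xs ++ [x]) = pvStrAdd (pvJoin xs) x := by
  simp [pvJoin, pvStrAdd]

-- the per-index block length
def pvLen (diffs : List Int) (i : Nat) : Nat := (16 - diffs.getD i 0).toNat

-- the suffix appended to vector j after the first m outer iterations of A
def pvSuf (diffs : List Int) (m j : Nat) : String :=
  pvJoin ((List.range m).map (fun i => pvStrMul (if i = j then '1' else '0') (16 - diffs.getD i 0)))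

theorem pvSuf_zero (diffs : List Int) (j : Nat) : pvSuf diffs 0 j = "" := by
  simp [pvSuf, pvJoin]

theorem pvSuf_succ (diffs : List Int) (m j : Nat) :
    pvSuf diffs (m + 1) j
      = pvStrAdd (pvSuf diffs m j) (pvStrMul (if m = j then '1' else '0') (16 - diffs.getD m 0)) := by
  simp [pvSuf, List.range_succ, pvJoin_append_singleton]

-- A's inner loop, for a generic per-index appended string f j
theorem inner_loop_eq (f : Nat → String) :
    ∀ (n : Nat) (nv : List String), n ≤ nv.length →
    (List.range n).foldl (fun nv j => nv.set j (pvStrAdd (nv.getD j "") (f j))) nv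
      = nv.mapIdx (fun j v => if j < n then pvStrAdd v (f j) else v) := by
  intro n
  induction n with
  | zero =>
      intro nv _
      apply List.ext_getElem
      · simp
      · intro j hj hj'
        simp [List.getElem_mapIdx]
  | succ n ih =>
      intro nv hn
      have hn' : n ≤ nv.length := by omega
      rw [List.range_succ, List.foldl_append, List.foldl_cons, List.foldl_nil, ih nv hn']
      have hlen : n < (nv.mapIdx (fun j v => if j < n then pvStrAdd v (f j) else v)).length := by
        simp; omega
      have hget : (nv.mapIdx (fun j v => if j < n then pvStrAdd v (f j) else v)).getD n ""
          = nv[n] := by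
        rw [List.getD_eq_getElem _ _ hlen, List.getElem_mapIdx]
        simp
        rfl
      rw [hget]
      apply List.ext_getElem
      · simp
      · intro m hm hm'
        have hmlen : m < nv.length := by simpa using hm'
        by_cases h : n = m
        · subst h
          simp [List.getElem_mapIdx]
          rfl
        · simp only [List.getElem_set, if_neg h, List.getElem_mapIdx]
          split_ifs with h1 h2 h2 <;> first | rfl | omega

-- A's outer loop after m iterations
theorem outer_loop_eq (vecs : List String) (diffs : List Int) :
    ∀ (m : Nat),
    (List.range m).foldl (fun (st : List String × Int) i =>
        let k : Int := 16 - diffs.getD i 0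
        ((List.range vecs.length).foldl (fun nv j =>
            if j ≠ i then nv.set j (pvStrAdd (nv.getD j "") (pvStrMul '0' k))
            else nv.set i (pvStrAdd (nv.getD i "") (pvStrMul '1' k))) st.1,
         st.2 + k)) (vecs, 0)
      = (vecs.mapIdx (fun j v => pvStrAdd v (pvSuf diffs m j)),
         ((List.range m).map (fun i => 16 - diffs.getD i 0)).sum) := by
  intro m
  induction m with
  | zero =>
      simp only [List.range_zero, List.foldl_nil, List.map_nil, List.sum_nil, Prod.mk.injEq]
      refine ⟨?_, trivial⟩
      apply List.ext_getElem
      · simp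
      · intro j hj hj'
        rw [List.getElem_mapIdx]
        simp [pvSuf_zero, pvStrAdd_empty]
  | succ m ih =>
      rw [List.range_succ, List.foldl_append, List.foldl_cons, List.foldl_nil, ih]
      simp only [Prod.mk.injEq]
      refine ⟨?_, ?_⟩
      · have hbody : (fun (nv : List String) j =>
              if j ≠ m then nv.set j (pvStrAdd (nv.getD j "") (pvStrMul '0' (16 - diffs.getD m 0)))
              else nv.set m (pvStrAdd (nv.getD m "") (pvStrMul '1' (16 - diffs.getD m 0))))
            = (fun (nv : List String) j =>
              nv.set j (pvStrAdd (nv.getD j "")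
                (pvStrMul (if m = j then '1' else '0') (16 - diffs.getD m 0)))) := by
          funext nv j
          by_cases h : j = m
          · subst h; simp
          · simp [h, Ne.symm h]
        rw [hbody]
        rw [inner_loop_eq _ vecs.length _ (by simp)]
        apply List.ext_getElem
        · simp
        · intro j hj hj'
          rw [List.getElem_mapIdx, List.getElem_mapIdx]
          have hjv : j < vecs.length := by simpa using hj'
          rw [List.getElem_mapIdx]
          rw [if_pos hjv, pvSuf_succ, pvStrAdd_assoc]
      · rw [List.map_append, List.sum_append]
        simp

-- flatten of all-zero runs is one zero run
theorem zeros_flatten : ∀ (L : List Nat),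
    ((L.map (fun m => List.replicate m '0')).flatten) = List.replicate L.sum '0' := by
  intro L
  induction L with
  | nil => simp
  | cons a L ih =>
      simp only [List.map_cons, List.flatten_cons, List.sum_cons, ih, List.replicate_add]

theorem zeros_flatten' (f : Nat → Nat) (l : List Nat) :
    ((l.map (fun i => List.replicate (f i) '0')).flatten) = List.replicate ((l.map f).sum) '0' := by
  rw [← zeros_flatten (l.map f), List.map_map]
  rfl

-- pvSuf as three runs (prefix zeros, ones, suffix zeros), for j < n
theorem pvSuf_three_runs (diffs : List Int) (n j : Nat) (hj : j < n) :
    (pvSuf diffs n j).toList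
      = List.replicate (((List.range j).map (pvLen diffs)).sum) '0'
        ++ List.replicate (pvLen diffs j) '1'
        ++ List.replicate ((((List.range n).map (pvLen diffs)).sum)
              - ((List.range j).map (pvLen diffs)).sum - pvLen diffs j) '0' := by
  have hsplit : n = (j + 1) + (n - (j + 1)) := by omega
  have hrange : List.range n
      = (List.range j ++ [j]) ++ (List.range (n - (j+1))).map ((j+1) + ·) := by
    conv_lhs => rw [hsplit, List.range_add, List.range_succ]
  have hpre : ((List.range j).map (fun i => pvStrMul (if i = j then '1' else '0')
        (16 - diffs.getD i 0))).map String.toList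
      = (List.range j).map (fun i => List.replicate (pvLen diffs i) '0') := by
    rw [List.map_map]
    apply List.map_congr_left
    intro i hi
    have : i ≠ j := by have := List.mem_range.mp hi; omega
    simp [pvStrMul, pvLen, this]
  have hpost : (((List.range (n - (j+1))).map ((j+1) + ·)).map
        (fun i => pvStrMul (if i = j then '1' else '0') (16 - diffs.getD i 0))).map String.toList
      = ((List.range (n - (j+1))).map ((j+1) + ·)).map
          (fun i => List.replicate (pvLen diffs i) '0') := by
    rw [List.map_map]
    apply List.map_congr_left
    intro i hi
    obtain ⟨i', hi', rfl⟩ := List.mem_map.mp hi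
    have : j + 1 + i' ≠ j := by omega
    simp [pvStrMul, pvLen, this]
  have hsum : ((List.range n).map (pvLen diffs)).sum
      = ((List.range j).map (pvLen diffs)).sum + pvLen diffs j
        + (((List.range (n - (j+1))).map ((j+1) + ·)).map (pvLen diffs)).sum := by
    rw [hrange]
    simp [List.map_map]
    omega
  rw [pvSuf, pvJoin]
  conv_lhs => rw [hrange]
  simp only [List.map_append, List.flatten_append, String.toList_ofList]
  rw [hpre, hpost, zeros_flatten' (pvLen diffs) (List.range j),
      zeros_flatten' (pvLen diffs) ((List.range (n - (j+1))).map ((j+1) + ·))]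
  have htail : (((List.range n).map (pvLen diffs)).sum
        - ((List.range j).map (pvLen diffs)).sum - pvLen diffs j)
      = (((List.range (n - (j+1))).map ((j+1) + ·)).map (pvLen diffs)).sum := by omega
  rw [htail]
  simp [pvStrMul, pvLen]

theorem mapIdx_congr' {α β : Type} (f g : Nat → α → β) (h : ∀ j a, f j a = g j a) :
    ∀ (l : List α), l.mapIdx f = l.mapIdx g := by
  intro l
  induction l generalizing f g with
  | nil => simp
  | cons a l ih =>
      simp only [List.mapIdx_cons, h 0 a]
      rw [ih (fun i => f (i + 1)) (fun i => g (i + 1)) (fun j b => h (j + 1) b)]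

-- B's accumulator fold, characterised (g builds one output string from vector, prefix, block length)
theorem foldB (g : String → Nat → Nat → String) :
    ∀ (xs : List (String × Nat)) (acc : List String) (pre : Nat),
    xs.foldl (fun (st : List String × Nat) p => (st.1 ++ [g p.1 st.2 p.2], st.2 + p.2)) (acc, pre)
      = (acc ++ xs.mapIdx (fun j p => g p.1 (pre + ((xs.take j).map Prod.snd).sum) p.2),
         pre + (xs.map Prod.snd).sum) := by
  intro xs
  induction xs with
  | nil => intro acc pre; simp
  | cons a xs ih =>
      intro acc pre
      rw [List.foldl_cons, ih]
      simp only [List.mapIdx_cons, List.take_zero, List.map_nil, List.sum_nil, Nat.add_zero,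
        List.take_succ_cons, List.map_cons, List.sum_cons]
      refine Prod.ext ?_ ?_
      · rw [List.append_assoc, List.singleton_append]
        refine congrArg (acc ++ ·) ?_
        refine congrArg (List.cons _) ?_
        exact mapIdx_congr' _ _ (fun j p => by rw [Nat.add_assoc]) xs
      · simp only [Nat.add_assoc]

theorem map_snd_take_zip {α β : Type} :
    ∀ (a : List α) (b : List β) (j : Nat), j ≤ a.length → j ≤ b.length →
    ((a.zip b).take j).map Prod.snd = b.take j := by
  intro a
  induction a with
  | nil =>
      intro b j h _
      simp only [List.length_nil, Nat.le_zero] at h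
      subst h
      simp
  | cons x a ih =>
      intro b j hja hjb
      cases b with
      | nil => simp at hjb; subst hjb; simp
      | cons y b =>
          cases j with
          | zero => simp
          | succ j =>
              simp only [List.zip_cons_cons, List.take_succ_cons, List.map_cons]
              rw [ih b j (by simpa using hja) (by simpa using hjb)]

theorem take_range' (j n : Nat) (h : j ≤ n) : (List.range n).take j = List.range j := by
  apply List.ext_getElem
  · simp; omega
  · intro m hm hm'
    simp [List.getElem_range]

-- B's port, rewritten to A's mapIdx/pvSuf form
theorem alt_eq (vecs : List String) (diffs : List Int) :
    complete_vectors_alt vecs diffs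
      = (vecs.mapIdx (fun j v => pvStrAdd v (pvSuf diffs vecs.length j)),
         ((List.range vecs.length).map (fun i => 16 - diffs.getD i 0)).sum) := by
  simp only [complete_vectors_alt]
  have hlens : ((List.range vecs.length).map (fun i => 16 - diffs.getD i 0)).map
        (fun k => if 0 < k then k.toNat else 0)
      = (List.range vecs.length).map (pvLen diffs) := by
    rw [List.map_map]
    apply List.map_congr_left
    intro i _
    simp only [Function.comp_apply]
    by_cases h : 0 < 16 - diffs.getD i 0
    · rw [if_pos h]; rfl
    · rw [if_neg h, pvLen, Int.toNat_of_nonpos (by omega)]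
  rw [hlens]
  have hlen : ((List.range vecs.length).map (pvLen diffs)).length = vecs.length := by simp
  have h := foldB (fun v pre L => pvStrAdd v (String.ofList
      (List.replicate pre '0' ++ List.replicate L '1'
        ++ List.replicate ((((List.range vecs.length).map (pvLen diffs)).sum) - pre - L) '0')))
    (vecs.zip ((List.range vecs.length).map (pvLen diffs))) [] 0
  simp only [] at h
  rw [h, List.nil_append]
  refine Prod.ext ?_ rfl
  apply List.ext_getElem
  · simp
  · intro j hj hj'
    have hjn : j < vecs.length := by simpa using hj'
    rw [List.getElem_mapIdx, List.getElem_mapIdx, List.getElem_zip]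
    have hsnd : (((vecs.zip ((List.range vecs.length).map (pvLen diffs))).take j).map Prod.snd)
        = ((List.range vecs.length).map (pvLen diffs)).take j := by
      apply map_snd_take_zip
      · omega
      · simp; omega
    have htake : ((List.range vecs.length).map (pvLen diffs)).take j
        = (List.range j).map (pvLen diffs) := by
      rw [← List.map_take, take_range' j vecs.length (by omega)]
    have hget : ((List.range vecs.length).map (pvLen diffs))[j] = pvLen diffs j := by
      simp
    simp only [hsnd, htake, hget, Nat.zero_add]
    congr 1
    rw [← pvSuf_three_runs diffs vecs.length j hjn, String.ofList_toList]

-- ===== VERDICT (by name: the statement is the Claim_ definition above) =====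
theorem complete_vectors_spec : Claim_equal_complete_vectors := by
  intro vecs diffs _ _
  show complete_vectors vecs diffs = complete_vectors_alt vecs diffs
  rw [alt_eq]
  unfold complete_vectors
  exact outer_loop_eq vecs diffs vecs.length
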